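-- pv_equiv track=rewrite | github.com/matheusht/adopt-redthread | scripts/build_evidence_readiness.py | _readiness_status
-- ===== SOURCE A (Python) =====
-- def _readiness_status(blockers: list[dict[str, str]]) -> str:
--     codes = {blocker["code"] for blocker in blockers}
--     if "privacy_marker_audit_failed" in codes:
--         return "privacy_blocked"
--     if "missing_required_evidence" in codes or "invalid_required_evidence_schema" in codes:
--         return "missing_required_evidence"
--     if "stale_or_missing_evidence_copies" in codes:
--         return "stale_or_missing_evidence"
--     if "external_validation_not_ready" in codes or "external_review_returns_not_ready" in codes:
--         return "waiting_for_external_validation"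
--     if "boundary_context_not_ready" in codes or "boundary_context_request_not_ready" in codes:
--         return "boundary_context_pending"
--     if "boundary_probe_not_executed" in codes:
--         return "boundary_context_pending"
--     if "matrix_missing_decision_examples" in codes:
--         return "needs_decision_example_coverage"
--     return "ready_for_sanitized_readout"
-- ===== SOURCE B (Python) =====
-- _PRIORITY = {
--     "privacy_marker_audit_failed": 0,
--     "missing_required_evidence": 1,
--     "invalid_required_evidence_schema": 1,
--     "stale_or_missing_evidence_copies": 2,
--     "external_validation_not_ready": 3,
--     "external_review_returns_not_ready": 3,
--     "boundary_context_not_ready": 4,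
--     "boundary_context_request_not_ready": 4,
--     "boundary_probe_not_executed": 4,
--     "matrix_missing_decision_examples": 5,
-- }
--
-- _STATUS = [
--     "privacy_blocked",
--     "missing_required_evidence",
--     "stale_or_missing_evidence",
--     "waiting_for_external_validation",
--     "boundary_context_pending",
--     "needs_decision_example_coverage",
--     "ready_for_sanitized_readout",
-- ]
--
--
-- def _readiness_status(blockers: list[dict[str, str]]) -> str:
--     # One pass keeping only the minimum priority rank seen; no code set is built.
--     best = 6
--     for blocker in blockers:
--         best = min(best, _PRIORITY.get(blocker["code"], 6))
--     return _STATUS[best]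
-- ===== Notes on version B (the rewrite author's own statement) =====
-- stated objective: alternative
-- what changed: Instead of building a set of codes and testing it against a seven-branch if-chain, B maps each blocker's code to a numeric priority rank, keeps the minimum rank in a single fold, and indexes a status table with it.
import Mathlib
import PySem

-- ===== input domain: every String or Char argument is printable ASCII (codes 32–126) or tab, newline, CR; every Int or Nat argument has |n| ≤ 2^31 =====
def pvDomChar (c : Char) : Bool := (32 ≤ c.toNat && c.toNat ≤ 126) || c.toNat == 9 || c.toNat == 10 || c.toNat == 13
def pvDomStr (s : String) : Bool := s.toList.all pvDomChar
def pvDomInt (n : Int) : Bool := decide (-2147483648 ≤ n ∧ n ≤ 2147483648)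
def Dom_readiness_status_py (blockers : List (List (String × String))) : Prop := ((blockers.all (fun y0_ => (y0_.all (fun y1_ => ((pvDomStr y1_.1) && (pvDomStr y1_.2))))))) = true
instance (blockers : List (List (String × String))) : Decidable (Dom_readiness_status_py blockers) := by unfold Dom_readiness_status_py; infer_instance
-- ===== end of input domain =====

-- B replaces A's code-set + seven-branch if-chain by a single fold that keeps the minimum
-- priority rank of the blockers' codes and then indexes a status table with that rank.

-- ===== PORT A =====
-- blocker["code"]: the key may be absent, which raises KeyError — exactly those inputs are
-- excluded by Pre_, so the total form (List.lookup …).getD "" is never taken there.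
def pvCode (b : List (String × String)) : String := (List.lookup "code" b).getD ""

def pvCodesOf (blockers : List (List (String × String))) : PySem.Set String :=
  PySem.Set.ofList (blockers.map pvCode)

-- codes = {blocker["code"] for blocker in blockers} is pvCodesOf blockers
def readiness_status_py (blockers : List (List (String × String))) : String :=
  if PySem.Set.contains (pvCodesOf blockers) "privacy_marker_audit_failed" then "privacy_blocked"
  else if PySem.Set.contains (pvCodesOf blockers) "missing_required_evidence" || PySem.Set.contains (pvCodesOf blockers) "invalid_required_evidence_schema" then "missing_required_evidence"
  else if PySem.Set.contains (pvCodesOf blockers) "stale_or_missing_evidence_copies" then "stale_or_missing_evidence"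
  else if PySem.Set.contains (pvCodesOf blockers) "external_validation_not_ready" || PySem.Set.contains (pvCodesOf blockers) "external_review_returns_not_ready" then "waiting_for_external_validation"
  else if PySem.Set.contains (pvCodesOf blockers) "boundary_context_not_ready" || PySem.Set.contains (pvCodesOf blockers) "boundary_context_request_not_ready" then "boundary_context_pending"
  else if PySem.Set.contains (pvCodesOf blockers) "boundary_probe_not_executed" then "boundary_context_pending"
  else if PySem.Set.contains (pvCodesOf blockers) "matrix_missing_decision_examples" then "needs_decision_example_coverage"
  else "ready_for_sanitized_readout"

-- ===== PORT B =====
-- the literal Python dict _PRIORITY, as an association list (distinct keys; only read via .get)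
def pvPriority : List (String × Nat) :=
  [ ("privacy_marker_audit_failed", 0),
    ("missing_required_evidence", 1),
    ("invalid_required_evidence_schema", 1),
    ("stale_or_missing_evidence_copies", 2),
    ("external_validation_not_ready", 3),
    ("external_review_returns_not_ready", 3),
    ("boundary_context_not_ready", 4),
    ("boundary_context_request_not_ready", 4),
    ("boundary_probe_not_executed", 4),
    ("matrix_missing_decision_examples", 5) ]

def pvStatus : List String :=
  [ "privacy_blocked",
    "missing_required_evidence",
    "stale_or_missing_evidence",
    "waiting_for_external_validation",
    "boundary_context_pending",
    "needs_decision_example_coverage",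
    "ready_for_sanitized_readout" ]

-- _PRIORITY.get(code, 6): exact, pvPriority's keys are distinct so first-match lookup is dict lookup
def pvRank (c : String) : Nat := (List.lookup c pvPriority).getD 6

-- best = fold of min over the ranks; _STATUS[best] is exact since 0 ≤ best ≤ 6 = len(_STATUS)-1 always
def readiness_status_py_alt (blockers : List (List (String × String))) : String :=
  pvStatus.getD (blockers.foldl (fun best blocker => min best (pvRank ((List.lookup "code" blocker).getD ""))) 6) "ready_for_sanitized_readout"

-- ===== PRECONDITION & SPEC =====
-- Pre_ excludes exactly the inputs where some blocker dict lacks the key "code": there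
-- blocker["code"] raises KeyError in A (and likewise in B).
def Pre_readiness_status_py (blockers : List (List (String × String))) : Prop :=
  (blockers.all (fun b => b.any (fun p => p.1 == "code"))) = true
instance (blockers : List (List (String × String))) : Decidable (Pre_readiness_status_py blockers) := by unfold Pre_readiness_status_py; infer_instance

def pvWitness_readiness_status_py : (List (List (String × String))) :=
  [[("code", "stale_or_missing_evidence_copies")], [("code", "x"), ("note", "y")]]

def Spec_readiness_status_py (blockers : List (List (String × String))) (out : String) : Prop := out = readiness_status_py_alt blockers
instance (blockers : List (List (String × String))) (out : String) : Decidable (Spec_readiness_status_py blockers out) := by unfold Spec_readiness_status_py; infer_instance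

-- ===== CLAIM (what is proved, stated in full; the proofs are below) =====
def Claim_equal_readiness_status_py : Prop := ∀ (blockers : List (List (String × String))), Dom_readiness_status_py blockers → Pre_readiness_status_py blockers → Spec_readiness_status_py blockers (readiness_status_py blockers)

-- ===== LEMMAS AND PROOFS =====

-- pvRank as a plain if-chain (computes the dict literal away)
theorem pvRank_eq (c : String) : pvRank c =
    if c = "privacy_marker_audit_failed" then 0
    else if c = "missing_required_evidence" then 1
    else if c = "invalid_required_evidence_schema" then 1
    else if c = "stale_or_missing_evidence_copies" then 2
    else if c = "external_validation_not_ready" then 3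
    else if c = "external_review_returns_not_ready" then 3
    else if c = "boundary_context_not_ready" then 4
    else if c = "boundary_context_request_not_ready" then 4
    else if c = "boundary_probe_not_executed" then 4
    else if c = "matrix_missing_decision_examples" then 5
    else 6 := by
  simp only [pvRank, pvPriority, List.lookup]
  repeat' split <;> simp_all

theorem pvRank_inv0 (c : String) (h : pvRank c = 0) : c = "privacy_marker_audit_failed" := by
  rw [pvRank_eq] at h; split_ifs at h <;> simp_all

theorem pvRank_inv1 (c : String) (h : pvRank c = 1) :
    c = "missing_required_evidence" ∨ c = "invalid_required_evidence_schema" := by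
  rw [pvRank_eq] at h; split_ifs at h <;> simp_all

theorem pvRank_inv2 (c : String) (h : pvRank c = 2) : c = "stale_or_missing_evidence_copies" := by
  rw [pvRank_eq] at h; split_ifs at h <;> simp_all

theorem pvRank_inv3 (c : String) (h : pvRank c = 3) :
    c = "external_validation_not_ready" ∨ c = "external_review_returns_not_ready" := by
  rw [pvRank_eq] at h; split_ifs at h <;> simp_all

theorem pvRank_inv4 (c : String) (h : pvRank c = 4) :
    c = "boundary_context_not_ready" ∨ c = "boundary_context_request_not_ready" ∨ c = "boundary_probe_not_executed" := by
  rw [pvRank_eq] at h; split_ifs at h <;> simp_all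

theorem pvRank_inv5 (c : String) (h : pvRank c = 5) : c = "matrix_missing_decision_examples" := by
  rw [pvRank_eq] at h; split_ifs at h <;> simp_all

-- the fold in B
def pvBest (blockers : List (List (String × String))) : Nat :=
  blockers.foldl (fun best blocker => min best (pvRank (pvCode blocker))) 6

theorem pvFoldl_min (L : List (List (String × String))) (a b : Nat) :
    L.foldl (fun x bl => min x (pvRank (pvCode bl))) (min a b) =
      min a (L.foldl (fun x bl => min x (pvRank (pvCode bl))) b) := by
  induction L generalizing a b with
  | nil => simp
  | cons x L ih =>
      simp only [List.foldl_cons]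
      rw [Nat.min_assoc, ih]

theorem pvBest_cons (b : List (String × String)) (L : List (List (String × String))) :
    pvBest (b :: L) = min (pvRank (pvCode b)) (pvBest L) := by
  simp only [pvBest, List.foldl_cons]
  rw [Nat.min_comm 6 (pvRank (pvCode b)), pvFoldl_min]

theorem pvBest_le (L : List (List (String × String))) : pvBest L ≤ 6 := by
  induction L with
  | nil => simp [pvBest]
  | cons b L ih => rw [pvBest_cons]; omega

theorem pvBest_le_mem (L : List (List (String × String))) (b : List (String × String))
    (hb : b ∈ L) : pvBest L ≤ pvRank (pvCode b) := by
  induction L with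
  | nil => cases hb
  | cons x L ih =>
      rw [pvBest_cons]
      rcases List.mem_cons.mp hb with rfl | h
      · omega
      · have := ih h; omega

theorem pvBest_exists (L : List (List (String × String))) (h : pvBest L < 6) :
    ∃ b ∈ L, pvRank (pvCode b) = pvBest L := by
  induction L with
  | nil => simp [pvBest] at h
  | cons x L ih =>
      rw [pvBest_cons] at h ⊢
      rcases Nat.le_total (pvRank (pvCode x)) (pvBest L) with hle | hle
      · exact ⟨x, List.mem_cons_self, by omega⟩
      · have hlt : pvBest L < 6 := by omega
        obtain ⟨b, hb, hrb⟩ := ih hlt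
        exact ⟨b, List.mem_cons_of_mem _ hb, by omega⟩

theorem pvContains_iff (blockers : List (List (String × String))) (s : String) :
    PySem.Set.contains (pvCodesOf blockers) s = true ↔ ∃ b ∈ blockers, pvCode b = s := by
  rw [PySem.Set.contains_iff]
  simp [pvCodesOf, PySem.Set.mem_ofList, List.mem_map]

-- a code of rank < pvBest cannot be present
theorem pvContains_false (blockers : List (List (String × String))) (s : String)
    (h : pvRank s < pvBest blockers) :
    PySem.Set.contains (pvCodesOf blockers) s = false := by
  cases hcs : PySem.Set.contains (pvCodesOf blockers) s
  · rfl
  · exfalso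
    obtain ⟨b, hb, hcode⟩ := (pvContains_iff blockers s).mp hcs
    have := pvBest_le_mem blockers b hb
    rw [hcode] at this
    omega

-- ===== VERDICT (by name: the statement is the Claim_ definition above) =====
theorem readiness_status_py_spec : Claim_equal_readiness_status_py := by
  intro blockers _ _
  unfold Spec_readiness_status_py readiness_status_py readiness_status_py_alt
  have halt : (blockers.foldl (fun best blocker => min best (pvRank ((List.lookup "code" blocker).getD ""))) 6) = pvBest blockers := rfl
  rw [halt]
  have hle := pvBest_le blockers
  have hex := pvBest_exists blockers
  set m := pvBest blockers with hm
  have hfalse : ∀ s : String, pvRank s < m →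
      PySem.Set.contains (pvCodesOf blockers) s = false := fun s h => pvContains_false blockers s h
  have htrue : ∀ s : String, (∃ b ∈ blockers, pvCode b = s) →
      PySem.Set.contains (pvCodesOf blockers) s = true := fun s h => (pvContains_iff blockers s).mpr h
  interval_cases m
  · -- m = 0
    obtain ⟨b, hb, hr⟩ := hex (by omega)
    have hc := pvRank_inv0 _ hr
    rw [htrue _ ⟨b, hb, hc⟩]
    simp [pvStatus]
  · -- m = 1
    obtain ⟨b, hb, hr⟩ := hex (by omega)
    have hc := pvRank_inv1 _ hr
    rw [hfalse "privacy_marker_audit_failed" (by decide)]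
    rcases hc with hc | hc <;> rw [htrue _ ⟨b, hb, hc⟩] <;> simp [pvStatus]
  · -- m = 2
    obtain ⟨b, hb, hr⟩ := hex (by omega)
    have hc := pvRank_inv2 _ hr
    rw [hfalse "privacy_marker_audit_failed" (by decide),
        hfalse "missing_required_evidence" (by decide),
        hfalse "invalid_required_evidence_schema" (by decide),
        htrue _ ⟨b, hb, hc⟩]
    simp [pvStatus]
  · -- m = 3
    obtain ⟨b, hb, hr⟩ := hex (by omega)
    have hc := pvRank_inv3 _ hr
    rw [hfalse "privacy_marker_audit_failed" (by decide),
        hfalse "missing_required_evidence" (by decide),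
        hfalse "invalid_required_evidence_schema" (by decide),
        hfalse "stale_or_missing_evidence_copies" (by decide)]
    rcases hc with hc | hc <;> rw [htrue _ ⟨b, hb, hc⟩] <;> simp [pvStatus]
  · -- m = 4
    obtain ⟨b, hb, hr⟩ := hex (by omega)
    have hc := pvRank_inv4 _ hr
    rw [hfalse "privacy_marker_audit_failed" (by decide),
        hfalse "missing_required_evidence" (by decide),
        hfalse "invalid_required_evidence_schema" (by decide),
        hfalse "stale_or_missing_evidence_copies" (by decide),
        hfalse "external_validation_not_ready" (by decide),
        hfalse "external_review_returns_not_ready" (by decide)]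
    rcases hc with hc | hc | hc
    · rw [htrue _ ⟨b, hb, hc⟩]; simp [pvStatus]
    · rw [htrue _ ⟨b, hb, hc⟩]; simp [pvStatus]
    · -- the probe code is present; the earlier boundary branch may or may not fire,
      -- but both boundary branches return the same status
      rw [htrue "boundary_probe_not_executed" ⟨b, hb, hc⟩]
      cases PySem.Set.contains (pvCodesOf blockers) "boundary_context_not_ready" <;>
        cases PySem.Set.contains (pvCodesOf blockers) "boundary_context_request_not_ready" <;>
        simp [pvStatus]
  · -- m = 5
    obtain ⟨b, hb, hr⟩ := hex (by omega)
    have hc := pvRank_inv5 _ hr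
    rw [hfalse "privacy_marker_audit_failed" (by decide),
        hfalse "missing_required_evidence" (by decide),
        hfalse "invalid_required_evidence_schema" (by decide),
        hfalse "stale_or_missing_evidence_copies" (by decide),
        hfalse "external_validation_not_ready" (by decide),
        hfalse "external_review_returns_not_ready" (by decide),
        hfalse "boundary_context_not_ready" (by decide),
        hfalse "boundary_context_request_not_ready" (by decide),
        hfalse "boundary_probe_not_executed" (by decide),
        htrue _ ⟨b, hb, hc⟩]
    simp [pvStatus]
  · -- m = 6
    rw [hfalse "privacy_marker_audit_failed" (by decide),
        hfalse "missing_required_evidence" (by decide),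
        hfalse "invalid_required_evidence_schema" (by decide),
        hfalse "stale_or_missing_evidence_copies" (by decide),
        hfalse "external_validation_not_ready" (by decide),
        hfalse "external_review_returns_not_ready" (by decide),
        hfalse "boundary_context_not_ready" (by decide),
        hfalse "boundary_context_request_not_ready" (by decide),
        hfalse "boundary_probe_not_executed" (by decide),
        hfalse "matrix_missing_decision_examples" (by decide)]
    simp [pvStatus]
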